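-- pv_equiv track=rewrite | github.com/BillFu/LPCTron_ZH | infer_grpc/frontend_infer/frontend/text_normalize_v5.py | normal_arab_num_perN
-- ===== SOURCE A (Python) =====
-- phone_num_dict = {'1':'幺','2':'二','3':'三','4':'四','5':'五',
-- 			'6':'六','7':'七','8':'八','9':'九','0':'零',
-- 			'.':'点','-':'杠','X':'x'}
--
-- def normal_arab_num_perN(num_str, N):
-- 	assert N > 1 and type(N) == int
-- 	normal_chars = []
-- 	for i, char in enumerate(num_str):
-- 		i1 = i + 1
-- 		normal_chars.append(phone_num_dict[char])
-- 		if i1 != 0 and i1 % N == 0: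
-- 			normal_chars.append("-")
--
-- 	result = ''.join(normal_chars)
-- 	return result
-- ===== SOURCE B (Python) =====
-- phone_num_dict = {'1':'幺','2':'二','3':'三','4':'四','5':'五',
-- 			'6':'六','7':'七','8':'八','9':'九','0':'零',
-- 			'.':'点','-':'杠','X':'x'}
--
-- def normal_arab_num_perN(num_str, N):
-- 	assert N > 1 and type(N) == int
--
-- 	def trans(s):
-- 		return ''.join(phone_num_dict[c] for c in s)
--
-- 	def chunk(s):
-- 		if not s:
-- 			return ''
-- 		if len(s) < N:
-- 			return trans(s)
-- 		return trans(s[:N]) + '-' + chunk(s[N:])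
--
-- 	return chunk(num_str)
-- ===== Notes on version B (the rewrite author's own statement) =====
-- stated objective: idiomatic
-- what changed: Replaces the per-character loop with a running index and modulo test by a direct recursion that translates and emits one N-character chunk (plus its separator) at a time.
import Mathlib
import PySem

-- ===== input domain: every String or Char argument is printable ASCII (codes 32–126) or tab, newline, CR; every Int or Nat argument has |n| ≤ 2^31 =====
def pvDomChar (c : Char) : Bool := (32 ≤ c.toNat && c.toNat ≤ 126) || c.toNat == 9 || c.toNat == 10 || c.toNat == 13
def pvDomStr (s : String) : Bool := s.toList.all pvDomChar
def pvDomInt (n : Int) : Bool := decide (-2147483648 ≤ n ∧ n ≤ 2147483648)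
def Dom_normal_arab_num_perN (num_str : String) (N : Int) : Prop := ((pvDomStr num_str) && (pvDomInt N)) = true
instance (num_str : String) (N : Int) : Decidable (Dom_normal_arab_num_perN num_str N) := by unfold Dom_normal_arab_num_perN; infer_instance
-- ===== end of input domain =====

-- B replaces A's per-character loop (running index, modulo test) by a chunk-at-a-time recursion; objective: idiomatic.

-- ===== PORT A =====
def pvPhoneDict : PySem.Dict Char String :=
  PySem.Dict.ofList [('1', "幺"), ('2', "二"), ('3', "三"), ('4', "四"), ('5', "五"),
                     ('6', "六"), ('7', "七"), ('8', "八"), ('9', "九"), ('0', "零"),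
                     ('.', "点"), ('-', "杠"), ('X', "x")]

-- phone_num_dict[char] raises KeyError on a missing key; Pre_ excludes that, so getD's default is never used.
def normal_arab_num_perN (num_str : String) (N : Int) : String :=
  let normal_chars :=
    (PySem.List.enumerate num_str.toList 0).foldl
      (fun acc (p : Int × Char) =>
        let i1 := p.1 + 1
        let acc := acc ++ [pvPhoneDict.getD p.2 ""]
        if i1 ≠ 0 ∧ PySem.Int.mod i1 N = 0 then acc ++ ["-"] else acc)
      ([] : List String)
  PySem.Str.join "" normal_chars

-- ===== PORT B =====
def pvTrans (l : List Char) : String :=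
  PySem.Str.join "" (l.map (fun c => pvPhoneDict.getD c ""))

-- chunk(s): 'rest.drop (n - 1)' is '(c :: rest).drop n' for n ≥ 1 (Pre_ gives N > 1), written so termination is structural.
def pvChunkRec (n : Nat) : List Char → String
  | [] => ""
  | c :: rest =>
    if rest.length + 1 < n then pvTrans (c :: rest)
    else pvTrans ((c :: rest).take n) ++ "-" ++ pvChunkRec n (rest.drop (n - 1))
termination_by l => l.length
decreasing_by simp only [List.length_drop, List.length_cons]; omega

def normal_arab_num_perN_alt (num_str : String) (N : Int) : String :=
  pvChunkRec N.toNat num_str.toList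

-- ===== PRECONDITION & SPEC =====
-- Pre_ excludes N ≤ 1 (A's assert raises AssertionError) and characters outside phone_num_dict (KeyError).
def Pre_normal_arab_num_perN (num_str : String) (N : Int) : Prop :=
  1 < N ∧ num_str.toList.all (fun c => pvPhoneDict.contains c) = true
instance (num_str : String) (N : Int) : Decidable (Pre_normal_arab_num_perN num_str N) := by
  unfold Pre_normal_arab_num_perN; infer_instance

def pvWitness_normal_arab_num_perN : String × Int := ("123", 2)

def Spec_normal_arab_num_perN (num_str : String) (N : Int) (out : String) : Prop := out = normal_arab_num_perN_alt num_str N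
instance (num_str : String) (N : Int) (out : String) : Decidable (Spec_normal_arab_num_perN num_str N out) := by unfold Spec_normal_arab_num_perN; infer_instance

-- ===== CLAIM (what is proved, stated in full; the proofs are below) =====
def Claim_equal_normal_arab_num_perN : Prop := ∀ (num_str : String) (N : Int), Dom_normal_arab_num_perN num_str N → Pre_normal_arab_num_perN num_str N → Spec_normal_arab_num_perN num_str N (normal_arab_num_perN num_str N)

-- ===== LEMMAS AND PROOFS =====

-- A's loop body, written as a recursion producing the list of emitted strings.
def pvARun (N : Int) : List Char → Int → List String
  | [], _ => []
  | c :: rest, i =>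
    pvPhoneDict.getD c "" ::
      (if (i + 1) ≠ 0 ∧ PySem.Int.mod (i + 1) N = 0
        then "-" :: pvARun N rest (i + 1) else pvARun N rest (i + 1))

lemma pvA_foldl (N : Int) (l : List Char) (i : Int) (acc : List String) :
    (PySem.List.enumerate l i).foldl
      (fun acc (p : Int × Char) =>
        let i1 := p.1 + 1
        let acc := acc ++ [pvPhoneDict.getD p.2 ""]
        if i1 ≠ 0 ∧ PySem.Int.mod i1 N = 0 then acc ++ ["-"] else acc)
      acc = acc ++ pvARun N l i := by
  induction l generalizing i acc with
  | nil => simp [PySem.List.enumerate_nil, pvARun]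
  | cons c rest ih =>
    rw [PySem.List.enumerate_cons]
    simp only [List.foldl_cons]
    rw [ih]
    by_cases h : (i + 1) ≠ 0 ∧ PySem.Int.mod (i + 1) N = 0 <;>
      simp [pvARun, h]

lemma pvA_eq (num_str : String) (N : Int) :
    normal_arab_num_perN num_str N = PySem.Str.join "" (pvARun N num_str.toList 0) := by
  unfold normal_arab_num_perN
  rw [pvA_foldl]
  rfl

lemma pvJoin_cons (x : String) (rest : List String) :
    PySem.Str.join "" (x :: rest) = x ++ PySem.Str.join "" rest := by
  apply String.toList_inj.mp
  cases rest with
  | nil =>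
    simp only [PySem.Str.toList_join, List.map_cons, List.map_nil,
      PySem.Chars.join_singleton]
    simp
  | cons y ys =>
    simp only [PySem.Str.toList_join, List.map_cons]
    rw [PySem.Chars.join_cons_cons]
    simp

lemma pvJoin_nil : PySem.Str.join "" ([] : List String) = "" := by
  apply String.toList_inj.mp
  simp [PySem.Str.toList_join, PySem.Chars.join_nil]

lemma pvTrans_cons (c : Char) (l : List Char) :
    pvTrans (c :: l) = pvPhoneDict.getD c "" ++ pvTrans l := by
  unfold pvTrans
  rw [List.map_cons, pvJoin_cons]

lemma pvTrans_nil : pvTrans [] = "" := by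
  unfold pvTrans
  simpa using pvJoin_nil

-- two positions ≡ 0 (mod N) cannot be d apart when 0 < d < N
lemma pvSep (N a d : Int) (hd : 0 < d) (hdN : d < N)
    (h1 : (a + d) % N = 0) : a % N ≠ 0 := by
  intro h2
  have hda : N ∣ (a + d) := Int.dvd_of_emod_eq_zero h1
  have hdb : N ∣ a := Int.dvd_of_emod_eq_zero h2
  have : N ∣ d := by
    have := Int.dvd_sub hda hdb
    simpa using this
  have := Int.le_of_dvd hd this
  omega

-- the key bridging lemma: within a group of d remaining slots, A emits the d translations and then a dash iff d chars exist
lemma pvL (N : Int) (hN : 1 < N) :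
    ∀ (d : Nat) (l : List Char) (i : Int),
      1 ≤ d → (d : Int) ≤ N → 0 ≤ i → (i + d) % N = 0 →
      PySem.Str.join "" (pvARun N l i) =
        pvTrans (l.take d) ++
          (if d ≤ l.length then "-" ++ PySem.Str.join "" (pvARun N (l.drop d) (i + d)) else "") := by
  intro d
  induction d with
  | zero => intro l i h1; omega
  | succ d ih =>
    intro l i _ hdN hi hmod
    push_cast at hdN hmod ⊢
    cases l with
    | nil =>
      simp only [pvARun, List.take_nil, List.length_nil, pvTrans_nil, pvJoin_nil]
      rw [if_neg (by omega)]
      apply String.toList_inj.mp; simp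
    | cons c rest =>
      by_cases hd : d = 0
      · subst hd
        have hc : (i + 1) ≠ 0 ∧ PySem.Int.mod (i + 1) N = 0 := by
          refine ⟨by omega, ?_⟩
          rw [PySem.Int.mod_eq_emod_of_pos (by omega)]
          simpa using hmod
        simp only [pvARun]
        rw [if_pos hc, pvJoin_cons, pvJoin_cons]
        simp only [List.take_succ_cons, List.take_zero, List.drop_succ_cons, List.drop_zero,
          List.length_cons, pvTrans_cons, pvTrans_nil]
        rw [if_pos (by omega)]
        have he : (i + ((0 : Nat) + 1 : Int)) = i + 1 := by norm_num
        rw [he]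
        apply String.toList_inj.mp; simp
      · have hc : ¬ ((i + 1) ≠ 0 ∧ PySem.Int.mod (i + 1) N = 0) := by
          rw [PySem.Int.mod_eq_emod_of_pos (by omega)]
          rintro ⟨-, h2⟩
          exact pvSep N (i + 1) d (by omega) (by omega)
            (by rw [show i + 1 + (d : Int) = i + ((d : Int) + 1) by ring]; exact hmod) h2
        simp only [pvARun]
        rw [if_neg hc, pvJoin_cons]
        rw [ih rest (i + 1) (by omega) (by omega) (by omega)
          (by rw [show i + 1 + (d : Int) = i + ((d : Int) + 1) by ring]; exact hmod)]
        simp only [List.take_succ_cons, List.drop_succ_cons, List.length_cons, pvTrans_cons]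
        push_cast
        rw [show i + 1 + (d : Int) = i + ((d : Int) + 1) by ring]
        by_cases hlen : d ≤ rest.length
        · rw [if_pos hlen]
          apply String.toList_inj.mp; simp
        · rw [if_neg hlen]
          apply String.toList_inj.mp; simp

lemma pvMain (N : Int) (hN : 1 < N) :
    ∀ (n : Nat) (l : List Char), l.length ≤ n → ∀ i : Int, 0 ≤ i → (i % N = 0) →
      PySem.Str.join "" (pvARun N l i) = pvChunkRec N.toNat l := by
  intro n
  induction n with
  | zero =>
    intro l hl i _ _
    have : l = [] := List.length_eq_zero_iff.mp (by omega)
    subst this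
    simp only [pvARun, pvChunkRec]
    exact pvJoin_nil
  | succ n ih =>
    intro l hl i hi hmod
    cases l with
    | nil =>
      simp only [pvARun, pvChunkRec]
      exact pvJoin_nil
    | cons c rest =>
      have hNnat : ((N.toNat : Int)) = N := by omega
      have hmod' : (i + (N.toNat : Int)) % N = 0 := by
        rw [hNnat, Int.add_emod, hmod, Int.emod_self]
        simp
      rw [pvL N hN N.toNat (c :: rest) i (by omega) (by omega) hi hmod']
      rw [pvChunkRec]
      by_cases hlen : rest.length + 1 < N.toNat
      · rw [if_pos hlen]
        rw [if_neg (by simp only [List.length_cons]; omega)]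
        rw [List.take_of_length_le (by simp only [List.length_cons]; omega)]
        apply String.toList_inj.mp; simp
      · rw [if_neg hlen]
        rw [if_pos (by simp only [List.length_cons]; omega)]
        have hdrop : rest.drop (N.toNat - 1) = (c :: rest).drop N.toNat := by
          cases hN' : N.toNat with
          | zero => omega
          | succ m => simp
        rw [hdrop]
        rw [ih ((c :: rest).drop N.toNat)
          (by have hl' := hl
              simp only [List.length_drop, List.length_cons] at hl' ⊢
              omega)
          (i + (N.toNat : Int)) (by omega) hmod']
        apply String.toList_inj.mp; simp

-- ===== VERDICT (by name: the statement is the Claim_ definition above) =====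
theorem normal_arab_num_perN_spec : Claim_equal_normal_arab_num_perN := by
  intro num_str N _ hpre
  obtain ⟨hN, -⟩ := hpre
  unfold Spec_normal_arab_num_perN normal_arab_num_perN_alt
  rw [pvA_eq]
  exact pvMain N hN num_str.toList.length num_str.toList le_rfl 0 le_rfl (by simp)
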